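-- pv_equiv track=rewrite | github.com/Sandeshb24/Workout-planner | streamlit_app.py | weight_loss_plan
-- ===== SOURCE A (Python) =====
-- def equipment_level(equipment_choice):
--     """Maps equipment choice number to a descriptive string."""
--     if equipment_choice == 1:
--         return "no equipment"
--     elif equipment_choice == 2:
--         return "basic equipment (dumbbells, resistance bands)"
--     elif equipment_choice == 3:
--         return "full gym access"
--     return "unknown equipment" # Fallback
--
-- def weight_loss_plan(workout_plan_dict, workout_type, time_available, experience_level, equipment):
--     """Generates a weight loss plan based on user preferences."""
--     cardio_options = [
--         "moderate running or cycling", "brisk walking on incline", "elliptical or stair climbing", "swimming laps", "dancing or cardio kickboxing"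
--     ]
--     strength_options = [
--         f"circuit training with {equipment_level(equipment)} (e.g., squats, lunges, push-ups, planks)",
--         f"full-body dumbbell workout focusing on compound movements with {equipment_level(equipment)}",
--         f"bodyweight strength exercises (e.g., burpees, mountain climbers, tricep dips)",
--         f"resistance band and bodyweight exercises for core and glutes with {equipment_level(equipment)}",
--         f"HIIT-style strength intervals using {equipment_level(equipment)}"
--     ]
--     flexibility_options = [
--         "yoga flow for calorie burn and flexibility", "Pilates for core strength and lengthening",
--         "dynamic stretching followed by foam rolling", "active recovery with light stretching and mobility drills"
--     ]
--     hiit_options = [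
--         "sprint intervals on treadmill or outdoors", "Tabata protocol with bodyweight exercises",
--         "plyometric drills and jump squats", "cycling or rowing machine intervals",
--         "metabolic conditioning using battle ropes or sled push"
--     ]
--     mixed_options = [
--         f"{time_available // 2} minutes of cardio and {time_available // 2} minutes of strength training",
--         f"alternating days of intense cardio and full-body strength with {equipment_level(equipment)}",
--         f"cross-training: combine a cardio machine with a strength circuit",
--         f"cardio + flexibility: {time_available // 2} mins running, {time_available // 2} mins yoga",
--         f"HIIT + strength: {time_available // 2} mins HIIT, {time_available // 2} mins bodyweight strength"
--     ]
--
--     day_index = 0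
--     for day in workout_plan_dict:
--         if workout_type == 1:  # Cardio
--             workout_plan_dict[day] = [f"{time_available} minutes of {cardio_options[day_index % len(cardio_options)]}"]
--         elif workout_type == 2:  # Strength Training
--             workout_plan_dict[day] = [f"{time_available} minutes of {strength_options[day_index % len(strength_options)]}"]
--         elif workout_type == 3:  # Flexibility
--             workout_plan_dict[day] = [f"{time_available} minutes of {flexibility_options[day_index % len(flexibility_options)]}"]
--         elif workout_type == 4:  # HIIT
--             workout_plan_dict[day] = [f"{time_available} minutes of {hiit_options[day_index % len(hiit_options)]}"]
--         elif workout_type == 5:  # Mixed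
--             workout_plan_dict[day] = [f"{mixed_options[day_index % len(mixed_options)]}"]
--         day_index += 1
--     return workout_plan_dict
-- ===== SOURCE B (Python) =====
-- def equipment_level(equipment_choice):
--     """Maps equipment choice number to a descriptive string."""
--     if equipment_choice == 1:
--         return "no equipment"
--     elif equipment_choice == 2:
--         return "basic equipment (dumbbells, resistance bands)"
--     elif equipment_choice == 3:
--         return "full gym access"
--     return "unknown equipment"
--
-- def weight_loss_plan(workout_plan_dict, workout_type, time_available, experience_level, equipment):
--     """Generates a weight loss plan based on user preferences.
--
--     Returns a NEW dict (same keys, same order); unlike A it does not mutate its argument.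
--     Strategy: pick the option list once, format ALL options up front (prefix applied to the
--     option list, not per day), tile that list to the number of days by list repetition and
--     slicing (no per-day modulo/branching), and zip it with the days.
--     """
--     cardio_options = [
--         "moderate running or cycling", "brisk walking on incline", "elliptical or stair climbing", "swimming laps", "dancing or cardio kickboxing"
--     ]
--     strength_options = [
--         f"circuit training with {equipment_level(equipment)} (e.g., squats, lunges, push-ups, planks)",
--         f"full-body dumbbell workout focusing on compound movements with {equipment_level(equipment)}",
--         f"bodyweight strength exercises (e.g., burpees, mountain climbers, tricep dips)",
--         f"resistance band and bodyweight exercises for core and glutes with {equipment_level(equipment)}",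
--         f"HIIT-style strength intervals using {equipment_level(equipment)}"
--     ]
--     flexibility_options = [
--         "yoga flow for calorie burn and flexibility", "Pilates for core strength and lengthening",
--         "dynamic stretching followed by foam rolling", "active recovery with light stretching and mobility drills"
--     ]
--     hiit_options = [
--         "sprint intervals on treadmill or outdoors", "Tabata protocol with bodyweight exercises",
--         "plyometric drills and jump squats", "cycling or rowing machine intervals",
--         "metabolic conditioning using battle ropes or sled push"
--     ]
--     mixed_options = [
--         f"{time_available // 2} minutes of cardio and {time_available // 2} minutes of strength training",
--         f"alternating days of intense cardio and full-body strength with {equipment_level(equipment)}",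
--         f"cross-training: combine a cardio machine with a strength circuit",
--         f"cardio + flexibility: {time_available // 2} mins running, {time_available // 2} mins yoga",
--         f"HIIT + strength: {time_available // 2} mins HIIT, {time_available // 2} mins bodyweight strength"
--     ]
--
--     table = {1: cardio_options, 2: strength_options, 3: flexibility_options, 4: hiit_options, 5: mixed_options}
--     if workout_type not in table:
--         return workout_plan_dict
--     opts = table[workout_type]
--     if workout_type != 5:
--         opts = [f"{time_available} minutes of {o}" for o in opts]
--     n = len(workout_plan_dict)
--     values = (opts * (n // len(opts) + 1))[:n]
--     return dict(zip(workout_plan_dict, ([v] for v in values)))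
-- ===== Notes on version B (the rewrite author's own statement) =====
-- stated objective: alternative
-- what changed: Instead of a per-day 5-way branch with modulo indexing mutating the dict in place, B selects the option list once, pre-formats the whole list (prefix applied once, not per day), tiles it to the number of days by list repetition and slicing, and zips it with the days into a fresh dict - no per-day branch, no per-day modulo, and a different side effect (A mutates its argument, B does not; the return value is identical).
import Mathlib
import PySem

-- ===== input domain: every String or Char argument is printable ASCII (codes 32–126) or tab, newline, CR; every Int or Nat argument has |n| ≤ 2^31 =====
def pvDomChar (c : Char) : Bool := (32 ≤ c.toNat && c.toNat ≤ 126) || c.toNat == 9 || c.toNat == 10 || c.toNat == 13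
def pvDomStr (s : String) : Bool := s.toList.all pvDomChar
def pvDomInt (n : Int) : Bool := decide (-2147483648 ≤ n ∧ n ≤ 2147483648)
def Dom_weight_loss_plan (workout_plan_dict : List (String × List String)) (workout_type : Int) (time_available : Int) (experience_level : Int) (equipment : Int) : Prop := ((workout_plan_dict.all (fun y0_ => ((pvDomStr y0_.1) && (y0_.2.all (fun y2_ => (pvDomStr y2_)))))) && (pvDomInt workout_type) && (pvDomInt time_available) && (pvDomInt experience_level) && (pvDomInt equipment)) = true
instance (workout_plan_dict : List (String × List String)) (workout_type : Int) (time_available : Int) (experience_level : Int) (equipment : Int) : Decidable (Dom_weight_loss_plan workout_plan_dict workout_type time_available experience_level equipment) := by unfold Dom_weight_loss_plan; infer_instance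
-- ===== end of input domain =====

-- B replaces A's per-day 5-way branch with modulo indexing (mutating the dict in place) by: pick the
-- option list once, pre-format it once, TILE it to the number of days by list repetition + slicing,
-- and zip it with the days into a fresh dict — return values agree; A mutates its argument, B does not.

-- ===== PORT A =====
def equipment_level (equipment_choice : Int) : String :=
  if equipment_choice = 1 then "no equipment"
  else if equipment_choice = 2 then "basic equipment (dumbbells, resistance bands)"
  else if equipment_choice = 3 then "full gym access"
  else "unknown equipment"

def cardio_options : List String :=
  ["moderate running or cycling", "brisk walking on incline", "elliptical or stair climbing", "swimming laps", "dancing or cardio kickboxing"]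

def strength_options (equipment : Int) : List String :=
  ["circuit training with " ++ equipment_level equipment ++ " (e.g., squats, lunges, push-ups, planks)",
   "full-body dumbbell workout focusing on compound movements with " ++ equipment_level equipment,
   "bodyweight strength exercises (e.g., burpees, mountain climbers, tricep dips)",
   "resistance band and bodyweight exercises for core and glutes with " ++ equipment_level equipment,
   "HIIT-style strength intervals using " ++ equipment_level equipment]

def flexibility_options : List String :=
  ["yoga flow for calorie burn and flexibility", "Pilates for core strength and lengthening",
   "dynamic stretching followed by foam rolling", "active recovery with light stretching and mobility drills"]

def hiit_options : List String :=
  ["sprint intervals on treadmill or outdoors", "Tabata protocol with bodyweight exercises",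
   "plyometric drills and jump squats", "cycling or rowing machine intervals",
   "metabolic conditioning using battle ropes or sled push"]

def mixed_options (time_available : Int) (equipment : Int) : List String :=
  [PySem.Int.toStr (PySem.Int.floordiv time_available 2) ++ " minutes of cardio and " ++ PySem.Int.toStr (PySem.Int.floordiv time_available 2) ++ " minutes of strength training",
   "alternating days of intense cardio and full-body strength with " ++ equipment_level equipment,
   "cross-training: combine a cardio machine with a strength circuit",
   "cardio + flexibility: " ++ PySem.Int.toStr (PySem.Int.floordiv time_available 2) ++ " mins running, " ++ PySem.Int.toStr (PySem.Int.floordiv time_available 2) ++ " mins yoga",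
   "HIIT + strength: " ++ PySem.Int.toStr (PySem.Int.floordiv time_available 2) ++ " mins HIIT, " ++ PySem.Int.toStr (PySem.Int.floordiv time_available 2) ++ " mins bodyweight strength"]

-- A: day_index = 0; for day in dict: 5-way branch assigning dict[day]; day_index += 1; return dict
def weight_loss_plan (workout_plan_dict : List (String × List String)) (workout_type : Int) (time_available : Int) (experience_level : Int) (equipment : Int) : List (String × List String) :=
  (((PySem.Dict.mk workout_plan_dict).keys).foldl
    (fun (st : PySem.Dict String (List String) × Int) day =>
      if workout_type = 1 then
        (st.1.insert day [PySem.Int.toStr time_available ++ " minutes of " ++ PySem.List.pyGetD cardio_options (PySem.Int.mod st.2 (PySem.List.len cardio_options)) ""], st.2 + 1)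
      else if workout_type = 2 then
        (st.1.insert day [PySem.Int.toStr time_available ++ " minutes of " ++ PySem.List.pyGetD (strength_options equipment) (PySem.Int.mod st.2 (PySem.List.len (strength_options equipment))) ""], st.2 + 1)
      else if workout_type = 3 then
        (st.1.insert day [PySem.Int.toStr time_available ++ " minutes of " ++ PySem.List.pyGetD flexibility_options (PySem.Int.mod st.2 (PySem.List.len flexibility_options)) ""], st.2 + 1)
      else if workout_type = 4 then
        (st.1.insert day [PySem.Int.toStr time_available ++ " minutes of " ++ PySem.List.pyGetD hiit_options (PySem.Int.mod st.2 (PySem.List.len hiit_options)) ""], st.2 + 1)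
      else if workout_type = 5 then
        (st.1.insert day [PySem.List.pyGetD (mixed_options time_available equipment) (PySem.Int.mod st.2 (PySem.List.len (mixed_options time_available equipment))) ""], st.2 + 1)
      else (st.1, st.2 + 1))
    (PySem.Dict.mk workout_plan_dict, 0)).1.items

-- ===== PORT B =====
-- table[workout_type] = raw option list (1..5)
def wlp_table (workout_type : Int) (time_available : Int) (equipment : Int) : Option (List String) :=
  if workout_type = 1 then some cardio_options
  else if workout_type = 2 then some (strength_options equipment)
  else if workout_type = 3 then some flexibility_options
  else if workout_type = 4 then some hiit_options
  else if workout_type = 5 then some (mixed_options time_available equipment)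
  else none

-- B: opts = table[wt]; if wt != 5: opts = [prefix+o for o in opts];
--    values = (opts * (n // len(opts) + 1))[:n]; return dict(zip(d, ([v] for v in values)))
-- n // len(opts) is Nat division here: both operands are nonnegative, where Python's // agrees;
-- likewise [:n] with n = len(d) ≥ 0 is List.take n.
def weight_loss_plan_alt (workout_plan_dict : List (String × List String)) (workout_type : Int) (time_available : Int) (experience_level : Int) (equipment : Int) : List (String × List String) :=
  match wlp_table workout_type time_available equipment with
  | none => workout_plan_dict
  | some opts0 =>
      let opts := if workout_type = 5 then opts0
                  else opts0.map (fun o => PySem.Int.toStr time_available ++ " minutes of " ++ o)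
      let n := workout_plan_dict.length
      let values := ((List.replicate (n / opts.length + 1) opts).flatten).take n
      (PySem.Dict.ofList ((workout_plan_dict.map Prod.fst).zip (values.map (fun v => [v])))).items

-- ===== PRECONDITION & SPEC =====
-- Pre_ excludes association lists with duplicate keys: they represent no Python dict (dict keys are
-- unique), and A's in-place overwrite vs B's zip-into-a-fresh-dict disagree on that encoding artefact.
def Pre_weight_loss_plan (workout_plan_dict : List (String × List String)) (workout_type : Int) (time_available : Int) (experience_level : Int) (equipment : Int) : Prop :=
  (workout_plan_dict.map Prod.fst).Nodup
instance (workout_plan_dict : List (String × List String)) (workout_type : Int) (time_available : Int) (experience_level : Int) (equipment : Int) : Decidable (Pre_weight_loss_plan workout_plan_dict workout_type time_available experience_level equipment) := by unfold Pre_weight_loss_plan; infer_instance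

def pvWitness_weight_loss_plan : (List (String × List String)) × Int × Int × Int × Int :=
  ([("Mon", ["rest"]), ("Tue", [])], 1, 30, 1, 2)

def Spec_weight_loss_plan (workout_plan_dict : List (String × List String)) (workout_type : Int) (time_available : Int) (experience_level : Int) (equipment : Int) (out : List (String × List String)) : Prop := out = weight_loss_plan_alt workout_plan_dict workout_type time_available experience_level equipment
instance (workout_plan_dict : List (String × List String)) (workout_type : Int) (time_available : Int) (experience_level : Int) (equipment : Int) (out : List (String × List String)) : Decidable (Spec_weight_loss_plan workout_plan_dict workout_type time_available experience_level equipment out) := by unfold Spec_weight_loss_plan; infer_instance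

-- ===== CLAIM (what is proved, stated in full; the proofs are below) =====
def Claim_equal_weight_loss_plan : Prop := ∀ (workout_plan_dict : List (String × List String)) (workout_type : Int) (time_available : Int) (experience_level : Int) (equipment : Int), Dom_weight_loss_plan workout_plan_dict workout_type time_available experience_level equipment → Pre_weight_loss_plan workout_plan_dict workout_type time_available experience_level equipment → Spec_weight_loss_plan workout_plan_dict workout_type time_available experience_level equipment (weight_loss_plan workout_plan_dict workout_type time_available experience_level equipment)

-- ===== LEMMAS AND PROOFS =====

-- overwriting the unique occurrence of key k in an items list
lemma map_overwrite (pre rest : List (String × List String)) (k : String) (v w : List String)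
    (hp : k ∉ pre.map Prod.fst) (hr : k ∉ rest.map Prod.fst) :
    (pre ++ (k, v) :: rest).map (fun p => if p.1 == k then (k, w) else p) = pre ++ (k, w) :: rest := by
  rw [List.map_append, List.map_cons]
  have h1 : pre.map (fun p => if p.1 == k then (k, w) else p) = pre := by
    conv_rhs => rw [← List.map_id pre]
    refine List.map_congr_left (fun p hpmem => ?_)
    have : p.1 ≠ k := fun h => hp (h ▸ List.mem_map_of_mem hpmem)
    simp [this]
  have h2 : rest.map (fun p => if p.1 == k then (k, w) else p) = rest := by
    conv_rhs => rw [← List.map_id rest]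
    refine List.map_congr_left (fun p hpmem => ?_)
    have : p.1 ≠ k := fun h => hr (h ▸ List.mem_map_of_mem hpmem)
    simp [this]
  have h3 : (if (((k, v) : String × List String).1 == k) = true then (k, w) else (k, v)) = (k, w) := by simp
  rw [h1, h2, h3]

-- A's loop, abstracted over the per-index value g: folding "insert this key" over the keys of the
-- dict turns the still-unprocessed suffix into its enumerated image, one entry per step.
lemma stepA_fold (g : Int → List String) :
    ∀ (rest pre : List (String × List String)) (i : Int),
    ((pre ++ rest).map Prod.fst).Nodup →
    ((rest.map Prod.fst).foldl
      (fun (st : PySem.Dict String (List String) × Int) day => (st.1.insert day (g st.2), st.2 + 1))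
      (PySem.Dict.mk (pre ++ rest), i))
    = (PySem.Dict.mk (pre ++ (PySem.List.enumerate rest i).map (fun p => (p.2.1, g p.1))), i + rest.length) := by
  intro rest
  induction rest with
  | nil => intro pre i _; simp [PySem.List.enumerate]
  | cons kv rest ih =>
    intro pre i hnd
    obtain ⟨k, v⟩ := kv
    have hkeys : (pre ++ (k, v) :: rest).map Prod.fst = pre.map Prod.fst ++ k :: rest.map Prod.fst := by
      simp
    rw [hkeys] at hnd
    have hdisj := List.disjoint_of_nodup_append hnd
    have hp : k ∉ pre.map Prod.fst := fun hm => hdisj hm (List.mem_cons_self)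
    have hr : k ∉ rest.map Prod.fst :=
      (List.nodup_cons.mp (hnd.of_append_right)).1
    have hcont : (PySem.Dict.mk (pre ++ (k, v) :: rest)).contains k = true := by
      rw [PySem.Dict.contains_mk]
      simp
    have hins : (PySem.Dict.mk (pre ++ (k, v) :: rest)).insert k (g i)
        = PySem.Dict.mk ((pre ++ [(k, g i)]) ++ rest) := by
      apply PySem.Dict.ext
      rw [PySem.Dict.items_insert_of_contains _ _ hcont]
      show (pre ++ (k, v) :: rest).map (fun p => if p.1 == k then (k, g i) else p) = _
      rw [map_overwrite pre rest k v (g i) hp hr]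
      simp
    have hnd' : (((pre ++ [(k, g i)]) ++ rest).map Prod.fst).Nodup := by
      simpa using hnd
    calc ((((k, v) :: rest).map Prod.fst).foldl
            (fun (st : PySem.Dict String (List String) × Int) day => (st.1.insert day (g st.2), st.2 + 1))
            (PySem.Dict.mk (pre ++ (k, v) :: rest), i))
        = ((rest.map Prod.fst).foldl
            (fun (st : PySem.Dict String (List String) × Int) day => (st.1.insert day (g st.2), st.2 + 1))
            (PySem.Dict.mk ((pre ++ [(k, g i)]) ++ rest), i + 1)) := by
          simp only [List.map_cons, List.foldl_cons, hins]
      _ = (PySem.Dict.mk ((pre ++ [(k, g i)]) ++ (PySem.List.enumerate rest (i + 1)).map (fun p => (p.2.1, g p.1))), (i + 1) + rest.length) := ih _ _ hnd'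
      _ = _ := by
          rw [PySem.List.enumerate_cons]
          congr 1
          · simp
          · push_cast [List.length_cons]; omega

-- A's loop when no branch fires: the dict is left untouched.
lemma fold_noop : ∀ (l : List String) (dd : PySem.Dict String (List String)) (i : Int),
    (l.foldl (fun (st : PySem.Dict String (List String) × Int) _ => (st.1, st.2 + 1)) (dd, i)).1 = dd := by
  intro l
  induction l with
  | nil => intro dd i; rfl
  | cons x l ih => intro dd i; simpa using ih dd (i + 1)

-- A's result, instantiated: fold over the dict's own keys starting from index 0.
lemma A_items (d : List (String × List String)) (g : Int → List String)
    (hnd : (d.map Prod.fst).Nodup) :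
    ((d.map (fun x => x.1)).foldl
      (fun (st : PySem.Dict String (List String) × Int) day => (st.1.insert day (g st.2), st.2 + 1))
      (PySem.Dict.mk d, 0)).1.items
    = (PySem.List.enumerate d 0).map (fun p => (p.2.1, g p.1)) := by
  have := stepA_fold g d [] 0 (by simpa using hnd)
  simp only [List.nil_append] at this
  show ((d.map Prod.fst).foldl
      (fun (st : PySem.Dict String (List String) × Int) day => (st.1.insert day (g st.2), st.2 + 1))
      (PySem.Dict.mk d, 0)).1.items = _
  rw [this]

-- reading the i-th element of a tiled list is modulo indexing into one tile
lemma flatten_replicate_getElem? {α : Type} (opts : List α) (hne : opts ≠ []) :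
    ∀ (k i : Nat), i < k * opts.length →
    ((List.replicate k opts).flatten)[i]? = opts[i % opts.length]? := by
  intro k
  induction k with
  | zero => intro i h; omega
  | succ k ih =>
    intro i h
    have hL : 0 < opts.length := List.length_pos_iff.mpr hne
    rw [List.replicate_succ, List.flatten_cons]
    by_cases hi : i < opts.length
    · rw [List.getElem?_append_left hi, Nat.mod_eq_of_lt hi]
    · push_neg at hi
      have hlt : i - opts.length < k * opts.length := by
        have hs : (k + 1) * opts.length = k * opts.length + opts.length := by ring
        omega
      rw [List.getElem?_append_right hi, ih (i - opts.length) hlt, Nat.mod_eq_sub_mod hi]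

-- the tiled list is long enough to cover n days
lemma tile_long_enough (n L : Nat) (hL : 0 < L) : n < (n / L + 1) * L := by
  have h1 := Nat.div_add_mod n L
  have h2 := Nat.mod_lt n hL
  have h3 : (n / L + 1) * L = n / L * L + L := by ring
  have h4 : n / L * L = L * (n / L) := by ring
  omega

-- dict() built from pairs with distinct keys: its items list is the pair list itself
lemma ofList_items_nodup (l : List (String × List String)) (h : (l.map Prod.fst).Nodup) :
    (PySem.Dict.ofList l).items = l := by
  have h2 := PySem.Dict.items_foldl_insert_fresh l Prod.fst Prod.snd PySem.Dict.empty
      (fun a _ => PySem.Dict.contains_empty _) h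
  simp at h2
  exact h2

-- B's result: zipping the keys with the tiled, pre-formatted option list and building a fresh dict
-- gives exactly the enumerated image produced by A's loop.
lemma B_zip_items (d : List (String × List String)) (opts : List String) (hne : opts ≠ [])
    (hnd : (d.map Prod.fst).Nodup) (g : Int → List String)
    (hg : ∀ i : Nat, i < d.length → g (i : Int) = [opts.getD (i % opts.length) ""]) :
    (PySem.Dict.ofList ((d.map Prod.fst).zip
      ((((List.replicate (d.length / opts.length + 1) opts).flatten).take d.length).map (fun v => [v])))).items
    = (PySem.List.enumerate d 0).map (fun p => (p.2.1, g p.1)) := by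
  have hL : 0 < opts.length := List.length_pos_iff.mpr hne
  have hflatlen : ((List.replicate (d.length / opts.length + 1) opts).flatten).length
      = (d.length / opts.length + 1) * opts.length := by
    simp [List.length_flatten, List.map_replicate, List.sum_replicate, smul_eq_mul]
  have hcover := tile_long_enough d.length opts.length hL
  have hziplen : ((d.map Prod.fst).zip
      ((((List.replicate (d.length / opts.length + 1) opts).flatten).take d.length).map (fun v => ([v] : List String)))).length = d.length := by
    simp [List.length_zip, List.length_take]
    omega
  -- the zip list IS the enumerated image, elementwise
  have hzip : ((d.map Prod.fst).zip
      ((((List.replicate (d.length / opts.length + 1) opts).flatten).take d.length).map (fun v => ([v] : List String))))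
      = (PySem.List.enumerate d 0).map (fun p => (p.2.1, g p.1)) := by
    apply List.ext_getElem
    · rw [hziplen]; simp [PySem.List.length_enumerate]
    · intro i h1 h2
      have hi : i < d.length := by rwa [hziplen] at h1
      have h3 : i < ((List.replicate (d.length / opts.length + 1) opts).flatten).length := by
        rw [hflatlen]; omega
      have hmod : i % opts.length < opts.length := Nat.mod_lt i hL
      have hitake : ∀ (hh : i < (((List.replicate (d.length / opts.length + 1) opts).flatten).take d.length).length),
          (((List.replicate (d.length / opts.length + 1) opts).flatten).take d.length)[i]'hh
          = opts.getD (i % opts.length) "" := by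
        intro hh
        rw [List.getElem_take]
        have h4 := flatten_replicate_getElem? opts hne (d.length / opts.length + 1) i (by omega)
        rw [List.getElem?_eq_getElem h3, List.getElem?_eq_getElem hmod] at h4
        rw [show ((List.replicate (d.length / opts.length + 1) opts).flatten)[i]'h3
              = opts[i % opts.length]'hmod from Option.some.inj h4]
        rw [List.getD_eq_getElem _ _ hmod]
      simp only [List.getElem_zip, List.getElem_map, PySem.List.getElem_enumerate, zero_add]
      rw [hitake, hg i hi]
  rw [hzip]
  have hkeysmap : ((PySem.List.enumerate d 0).map (fun p => (p.2.1, g p.1))).map Prod.fst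
      = d.map Prod.fst := by
    rw [List.map_map]
    have hsnd := PySem.List.map_snd_enumerate d 0
    calc (PySem.List.enumerate d 0).map (Prod.fst ∘ fun p => (p.2.1, g p.1))
        = ((PySem.List.enumerate d 0).map (fun p => p.2)).map Prod.fst := by
          rw [List.map_map]; rfl
      _ = d.map Prod.fst := by rw [hsnd]
  rw [ofList_items_nodup _ (by rw [hkeysmap]; exact hnd)]

-- the prefixed branches: A formats each looked-up option; B pre-formats the list and indexes it
lemma hg_prefixed (opts : List String) (hne : opts ≠ []) (t : Int) (i : Nat) :
    [PySem.Int.toStr t ++ " minutes of " ++ PySem.List.pyGetD opts (PySem.Int.mod (i : Int) ((opts.length : Nat) : Int)) ""]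
    = [(opts.map (fun o => PySem.Int.toStr t ++ " minutes of " ++ o)).getD
        (i % (opts.map (fun o => PySem.Int.toStr t ++ " minutes of " ++ o)).length) ""] := by
  have hL : 0 < opts.length := List.length_pos_iff.mpr hne
  have hmod : i % opts.length < opts.length := Nat.mod_lt i hL
  rw [PySem.Int.mod_natCast, PySem.List.pyGetD_natCast, List.length_map,
      List.getD_eq_getElem _ _ hmod, List.getD_eq_getElem _ _ (by simpa using hmod),
      List.getElem_map]

-- the mixed branch: no prefix on either side
lemma hg_mixed (opts : List String) (i : Nat) :
    [PySem.List.pyGetD opts (PySem.Int.mod (i : Int) ((opts.length : Nat) : Int)) ""]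
    = [opts.getD (i % opts.length) ""] := by
  rw [PySem.Int.mod_natCast, PySem.List.pyGetD_natCast]

-- one prefixed branch of the verdict, assembled
lemma branch_prefixed (d : List (String × List String)) (hpre : (d.map Prod.fst).Nodup)
    (opts : List String) (hne : opts ≠ []) (t : Int) :
    ((d.map (fun x => x.1)).foldl
      (fun (st : PySem.Dict String (List String) × Int) day =>
        (st.1.insert day [PySem.Int.toStr t ++ " minutes of " ++ PySem.List.pyGetD opts (PySem.Int.mod st.2 (PySem.List.len opts)) ""], st.2 + 1))
      (PySem.Dict.mk d, 0)).1.items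
    = (PySem.Dict.ofList ((d.map Prod.fst).zip
        ((((List.replicate (d.length / (opts.map (fun o => PySem.Int.toStr t ++ " minutes of " ++ o)).length + 1)
             (opts.map (fun o => PySem.Int.toStr t ++ " minutes of " ++ o))).flatten).take d.length).map (fun v => [v])))).items := by
  rw [A_items d (fun idx => [PySem.Int.toStr t ++ " minutes of " ++ PySem.List.pyGetD opts (PySem.Int.mod idx (PySem.List.len opts)) ""]) hpre,
      B_zip_items d (opts.map (fun o => PySem.Int.toStr t ++ " minutes of " ++ o)) (by simpa using hne) hpre
        (fun idx => [PySem.Int.toStr t ++ " minutes of " ++ PySem.List.pyGetD opts (PySem.Int.mod idx (PySem.List.len opts)) ""])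
        (fun i hi => hg_prefixed opts hne t i)]

-- the mixed branch of the verdict, assembled
lemma branch_mixed (d : List (String × List String)) (hpre : (d.map Prod.fst).Nodup)
    (opts : List String) (hne : opts ≠ []) :
    ((d.map (fun x => x.1)).foldl
      (fun (st : PySem.Dict String (List String) × Int) day =>
        (st.1.insert day [PySem.List.pyGetD opts (PySem.Int.mod st.2 (PySem.List.len opts)) ""], st.2 + 1))
      (PySem.Dict.mk d, 0)).1.items
    = (PySem.Dict.ofList ((d.map Prod.fst).zip
        ((((List.replicate (d.length / opts.length + 1) opts).flatten).take d.length).map (fun v => [v])))).items := by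
  rw [A_items d (fun idx => [PySem.List.pyGetD opts (PySem.Int.mod idx (PySem.List.len opts)) ""]) hpre,
      B_zip_items d opts hne hpre
        (fun idx => [PySem.List.pyGetD opts (PySem.Int.mod idx (PySem.List.len opts)) ""])
        (fun i hi => hg_mixed opts i)]

-- ===== VERDICT (by name: the statement is the Claim_ definition above) =====
theorem weight_loss_plan_spec : Claim_equal_weight_loss_plan := by
  intro d wt t e eq _hdom hpre
  unfold Spec_weight_loss_plan
  unfold Pre_weight_loss_plan at hpre
  by_cases h1 : wt = 1
  · subst h1; exact branch_prefixed d hpre cardio_options (by simp [cardio_options]) t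
  · by_cases h2 : wt = 2
    · subst h2; exact branch_prefixed d hpre (strength_options eq) (by simp [strength_options]) t
    · by_cases h3 : wt = 3
      · subst h3; exact branch_prefixed d hpre flexibility_options (by simp [flexibility_options]) t
      · by_cases h4 : wt = 4
        · subst h4; exact branch_prefixed d hpre hiit_options (by simp [hiit_options]) t
        · by_cases h5 : wt = 5
          · subst h5; exact branch_mixed d hpre (mixed_options t eq) (by simp [mixed_options])
          · simp only [weight_loss_plan, weight_loss_plan_alt, wlp_table,
              if_neg h1, if_neg h2, if_neg h3, if_neg h4, if_neg h5]
            rw [fold_noop]
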